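-- pv_equiv track=rewrite | github.com/NEISSproject/tei_entity_enricher | tei_entity_enricher/menu/tei_ner_gb.py | build_tng_stats_tablestring
-- ===== SOURCE A (Python) =====
-- def build_tng_stats_tablestring(entity_list, train_stats, dev_stats, test_stats):
--     tablestring = "Entity | \# All | \# Train | \# Test | \# Devel \n -----|-------|-------|-------|-------"
--     for entity in entity_list:
--         train_num = train_stats["B-" + entity] if "B-" + entity in train_stats.keys() else 0
--         test_num = test_stats["B-" + entity] if "B-" + entity in test_stats.keys() else 0
--         dev_num = dev_stats["B-" + entity] if "B-" + entity in dev_stats.keys() else 0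
--         tablestring += (
--             "\n "
--             + entity
--             + " | "
--             + str(train_num + test_num + dev_num)
--             + " | "
--             + str(train_num)
--             + " | "
--             + str(test_num)
--             + " | "
--             + str(dev_num)
--         )
--     train_num = train_stats["O"] if "O" in train_stats.keys() else 0
--     test_num = test_stats["O"] if "O" in test_stats.keys() else 0
--     dev_num = dev_stats["O"] if "O" in dev_stats.keys() else 0
--     tablestring += (
--         "\n "
--         + "unlabeled words"
--         + " | "
--         + str(train_num + test_num + dev_num)
--         + " | "
--         + str(train_num)
--         + " | "
--         + str(test_num)
--         + " | "
--         + str(dev_num)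
--     )
--     return tablestring
-- ===== SOURCE B (Python) =====
-- HEADER = "Entity | \# All | \# Train | \# Test | \# Devel \n -----|-------|-------|-------|-------"
--
--
-- def _row(name, counts):
--     tr, te, de = counts
--     return name + " | " + str(tr + te + de) + " | " + str(tr) + " | " + str(te) + " | " + str(de)
--
--
-- def build_tng_stats_tablestring(entity_list, train_stats, dev_stats, test_stats):
--     # Invert the traversal: scan each stats dict ONCE into a single merged map
--     # key -> (train, test, dev), then render every row from that one map.
--     merged = {}
--     for key, num in train_stats.items():
--         merged[key] = (num, 0, 0)
--     for key, num in test_stats.items():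
--         tr, _, de = merged.get(key, (0, 0, 0))
--         merged[key] = (tr, num, de)
--     for key, num in dev_stats.items():
--         tr, te, _ = merged.get(key, (0, 0, 0))
--         merged[key] = (tr, te, num)
--     rows = [_row(e, merged.get("B-" + e, (0, 0, 0))) for e in entity_list]
--     rows.append(_row("unlabeled words", merged.get("O", (0, 0, 0))))
--     return "\n ".join([HEADER] + rows)
-- ===== Notes on version B (the rewrite author's own statement) =====
-- stated objective: alternative
-- what changed: Reverses the data flow: instead of A's per-entity membership-test lookups into three separate dicts (with a duplicated trailing 'O' block), B scans each stats dict once into a single merged map key -> (train, test, dev) triple and renders every row, including the 'O' row, from that one map via a shared row helper.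
import Mathlib
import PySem

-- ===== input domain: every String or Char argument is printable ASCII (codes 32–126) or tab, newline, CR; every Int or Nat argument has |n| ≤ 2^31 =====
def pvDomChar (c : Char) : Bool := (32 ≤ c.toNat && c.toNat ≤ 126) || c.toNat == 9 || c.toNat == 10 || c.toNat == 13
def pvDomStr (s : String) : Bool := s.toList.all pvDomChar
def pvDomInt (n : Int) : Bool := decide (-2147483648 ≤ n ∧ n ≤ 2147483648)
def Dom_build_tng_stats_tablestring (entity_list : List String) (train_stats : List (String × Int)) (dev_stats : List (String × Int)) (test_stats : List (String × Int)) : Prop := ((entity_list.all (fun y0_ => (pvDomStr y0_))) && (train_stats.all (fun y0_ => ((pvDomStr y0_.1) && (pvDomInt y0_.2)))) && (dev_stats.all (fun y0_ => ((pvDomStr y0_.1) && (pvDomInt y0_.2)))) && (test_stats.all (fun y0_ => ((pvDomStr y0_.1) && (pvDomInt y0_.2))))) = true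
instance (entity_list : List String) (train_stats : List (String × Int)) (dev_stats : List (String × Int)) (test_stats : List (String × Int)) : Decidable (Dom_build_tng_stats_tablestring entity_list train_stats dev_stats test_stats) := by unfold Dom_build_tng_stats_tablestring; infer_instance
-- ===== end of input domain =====

-- B inverts the traversal: instead of looking each entity up in three dicts, it scans the three
-- stats dicts once each into ONE merged map key -> (train, test, dev) and renders all rows
-- (including the 'O' row) from that map; same output, a different data structure ('alternative').

-- ===== PORT A =====
-- literal port of A: a running tablestring, one loop over entity_list, then the 'O' block repeated
def build_tng_stats_tablestring (entity_list : List String) (train_stats : List (String × Int)) (dev_stats : List (String × Int)) (test_stats : List (String × Int)) : String :=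
  let trainD := PySem.Dict.ofList train_stats
  let devD := PySem.Dict.ofList dev_stats
  let testD := PySem.Dict.ofList test_stats
  let tablestring := "Entity | \\# All | \\# Train | \\# Test | \\# Devel \n -----|-------|-------|-------|-------"
  let tablestring := entity_list.foldl (fun tablestring entity =>
    let train_num := if trainD.contains ("B-" ++ entity) then trainD.getD ("B-" ++ entity) 0 else 0
    let test_num := if testD.contains ("B-" ++ entity) then testD.getD ("B-" ++ entity) 0 else 0
    let dev_num := if devD.contains ("B-" ++ entity) then devD.getD ("B-" ++ entity) 0 else 0
    tablestring ++ ("\n " ++ entity ++ " | " ++ PySem.Int.toStr (train_num + test_num + dev_num)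
      ++ " | " ++ PySem.Int.toStr train_num ++ " | " ++ PySem.Int.toStr test_num
      ++ " | " ++ PySem.Int.toStr dev_num)) tablestring
  let train_num := if trainD.contains "O" then trainD.getD "O" 0 else 0
  let test_num := if testD.contains "O" then testD.getD "O" 0 else 0
  let dev_num := if devD.contains "O" then devD.getD "O" 0 else 0
  tablestring ++ ("\n " ++ "unlabeled words" ++ " | " ++ PySem.Int.toStr (train_num + test_num + dev_num)
    ++ " | " ++ PySem.Int.toStr train_num ++ " | " ++ PySem.Int.toStr test_num
    ++ " | " ++ PySem.Int.toStr dev_num)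

-- ===== PORT B =====
-- _row(name, counts): counts = (train, test, dev)
def pvRowB (name : String) (counts : Int × Int × Int) : String :=
  name ++ " | " ++ PySem.Int.toStr (counts.1 + counts.2.1 + counts.2.2)
    ++ " | " ++ PySem.Int.toStr counts.1 ++ " | " ++ PySem.Int.toStr counts.2.1
    ++ " | " ++ PySem.Int.toStr counts.2.2

def build_tng_stats_tablestring_alt (entity_list : List String) (train_stats : List (String × Int)) (dev_stats : List (String × Int)) (test_stats : List (String × Int)) : String :=
  -- scan each stats dict once into one merged map key -> (train, test, dev)
  let merged := train_stats.foldl (fun m p => m.insert p.1 (p.2, (0 : Int), (0 : Int))) PySem.Dict.empty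
  let merged := test_stats.foldl (fun m p =>
    let t := m.getD p.1 (0, 0, 0); m.insert p.1 (t.1, p.2, t.2.2)) merged
  let merged := dev_stats.foldl (fun m p =>
    let t := m.getD p.1 (0, 0, 0); m.insert p.1 (t.1, t.2.1, p.2)) merged
  let rows := entity_list.map (fun e => pvRowB e (merged.getD ("B-" ++ e) (0, 0, 0)))
  let rows := rows ++ [pvRowB "unlabeled words" (merged.getD "O" (0, 0, 0))]
  PySem.Str.join "\n " ("Entity | \\# All | \\# Train | \\# Test | \\# Devel \n -----|-------|-------|-------|-------" :: rows)

-- ===== PRECONDITION & SPEC =====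
def Spec_build_tng_stats_tablestring (entity_list : List String) (train_stats : List (String × Int)) (dev_stats : List (String × Int)) (test_stats : List (String × Int)) (out : String) : Prop := out = build_tng_stats_tablestring_alt entity_list train_stats dev_stats test_stats
instance (entity_list : List String) (train_stats : List (String × Int)) (dev_stats : List (String × Int)) (test_stats : List (String × Int)) (out : String) : Decidable (Spec_build_tng_stats_tablestring entity_list train_stats dev_stats test_stats out) := by unfold Spec_build_tng_stats_tablestring; infer_instance

-- ===== CLAIM (what is proved, stated in full; the proofs are below) =====
def Claim_equal_build_tng_stats_tablestring : Prop := ∀ (entity_list : List String) (train_stats : List (String × Int)) (dev_stats : List (String × Int)) (test_stats : List (String × Int)), Dom_build_tng_stats_tablestring entity_list train_stats dev_stats test_stats → Spec_build_tng_stats_tablestring entity_list train_stats dev_stats test_stats (build_tng_stats_tablestring entity_list train_stats dev_stats test_stats)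

-- ===== LEMMAS AND PROOFS =====

-- A's "d[k] if k in d else 0" is just d.get(k, 0)
lemma if_contains_getD (d : PySem.Dict String Int) (k : String) :
    (if d.contains k then d.getD k 0 else 0) = d.getD k 0 := by
  by_cases h : d.contains k
  · simp [h]
  · simp at h
    rw [PySem.Dict.getD_of_not_contains d 0 h]
    simp

-- a foldl of per-key inserts, observed at one key k, is a scalar foldl over the pair list
lemma getD_foldl_upd {ν : Type} (f : ν → Int → ν) (ts : List (String × Int))
    (m : PySem.Dict String ν) (k : String) (d0 : ν) :
    (ts.foldl (fun m p => m.insert p.1 (f (m.getD p.1 d0) p.2)) m).getD k d0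
      = ts.foldl (fun cur p => if p.1 = k then f cur p.2 else cur) (m.getD k d0) := by
  induction ts generalizing m with
  | nil => rfl
  | cons p ps ih =>
    simp only [List.foldl_cons, ih]
    congr 1
    rw [PySem.Dict.getD_insert]
    by_cases h : k = p.1
    · simp [h]
    · simp [h, Ne.symm h]

def pvLastVal (ts : List (String × Int)) (k : String) (x : Int) : Int :=
  ts.foldl (fun cur p => if p.1 = k then p.2 else cur) x

lemma ofList_getD (ts : List (String × Int)) (k : String) :
    (PySem.Dict.ofList ts).getD k 0 = pvLastVal ts k 0 := by
  have h := getD_foldl_upd (fun _ v => v) ts PySem.Dict.empty k 0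
  simpa [PySem.Dict.getD_empty, pvLastVal] using h

lemma scalar_fold_1 (ts : List (String × Int)) (k : String) (x : Int) :
    ts.foldl (fun cur p => if p.1 = k then ((fun (_ : Int × Int × Int) v => (v, (0:Int), (0:Int))) cur p.2) else cur) (x, 0, 0)
      = (pvLastVal ts k x, 0, 0) := by
  induction ts generalizing x with
  | nil => rfl
  | cons p ps ih =>
    simp only [List.foldl_cons, pvLastVal]
    by_cases h : p.1 = k <;> simp [h, ih, pvLastVal]

lemma scalar_fold_2 (ts : List (String × Int)) (k : String) (a x c : Int) :
    ts.foldl (fun cur p => if p.1 = k then ((fun (t : Int × Int × Int) v => (t.1, v, t.2.2)) cur p.2) else cur) (a, x, c)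
      = (a, pvLastVal ts k x, c) := by
  induction ts generalizing x with
  | nil => rfl
  | cons p ps ih =>
    simp only [List.foldl_cons, pvLastVal]
    by_cases h : p.1 = k <;> simp [h, ih, pvLastVal]

lemma scalar_fold_3 (ts : List (String × Int)) (k : String) (a b x : Int) :
    ts.foldl (fun cur p => if p.1 = k then ((fun (t : Int × Int × Int) v => (t.1, t.2.1, v)) cur p.2) else cur) (a, b, x)
      = (a, b, pvLastVal ts k x) := by
  induction ts generalizing x with
  | nil => rfl
  | cons p ps ih =>
    simp only [List.foldl_cons, pvLastVal]
    by_cases h : p.1 = k <;> simp [h, ih, pvLastVal]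

-- the merged map of B agrees, componentwise, with A's three dicts
lemma merged_getD (tr te de : List (String × Int)) (k : String) :
    ((de.foldl (fun m p =>
        let t := m.getD p.1 (0, 0, 0); m.insert p.1 (t.1, t.2.1, p.2))
      (te.foldl (fun m p =>
        let t := m.getD p.1 (0, 0, 0); m.insert p.1 (t.1, p.2, t.2.2))
        (tr.foldl (fun m p => m.insert p.1 (p.2, (0 : Int), (0 : Int))) PySem.Dict.empty))).getD k (0, 0, 0))
      = ((PySem.Dict.ofList tr).getD k 0, (PySem.Dict.ofList te).getD k 0, (PySem.Dict.ofList de).getD k 0) := by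
  rw [getD_foldl_upd (fun t v => (t.1, t.2.1, v)) de,
      getD_foldl_upd (fun t v => (t.1, v, t.2.2)) te,
      getD_foldl_upd (fun _ v => (v, (0:Int), (0:Int))) tr,
      PySem.Dict.getD_empty,
      scalar_fold_1, scalar_fold_2, scalar_fold_3,
      ofList_getD, ofList_getD, ofList_getD]

-- joining with "\n " is the same as left-folding "acc ++ \"\\n \" ++ row" from the head
lemma join_eq_foldl (h : String) (rows : List String) :
    PySem.Str.join "\n " (h :: rows) = rows.foldl (fun acc r => acc ++ ("\n " ++ r)) h := by
  induction rows generalizing h with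
  | nil =>
    apply String.toList_injective
    simp [PySem.Str.join]
  | cons r rs ih =>
    rw [List.foldl_cons, ← ih (h ++ ("\n " ++ r))]
    apply String.toList_injective
    cases rs with
    | nil =>
      simp [PySem.Str.join, PySem.Chars.join_cons_cons, PySem.Chars.join_singleton]
    | cons r2 rs2 =>
      simp [PySem.Str.join, PySem.Chars.join_cons_cons]

lemma foldl_map_row (trainD devD testD : PySem.Dict String Int) (l : List String) (acc : String) :
    ((l.map (fun e => pvRowB e (trainD.getD ("B-" ++ e) 0, testD.getD ("B-" ++ e) 0, devD.getD ("B-" ++ e) 0))).foldl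
        (fun acc r => acc ++ ("\n " ++ r)) acc)
      = l.foldl (fun tablestring entity =>
          let train_num := if trainD.contains ("B-" ++ entity) then trainD.getD ("B-" ++ entity) 0 else 0
          let test_num := if testD.contains ("B-" ++ entity) then testD.getD ("B-" ++ entity) 0 else 0
          let dev_num := if devD.contains ("B-" ++ entity) then devD.getD ("B-" ++ entity) 0 else 0
          tablestring ++ ("\n " ++ entity ++ " | " ++ PySem.Int.toStr (train_num + test_num + dev_num)
            ++ " | " ++ PySem.Int.toStr train_num ++ " | " ++ PySem.Int.toStr test_num
            ++ " | " ++ PySem.Int.toStr dev_num)) acc := by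
  induction l generalizing acc with
  | nil => rfl
  | cons e es ih =>
    simp only [List.map_cons, List.foldl_cons, ih]
    congr 1
    simp only [pvRowB, if_contains_getD]
    apply String.toList_injective
    simp [String.toList_append]

-- ===== VERDICT (by name: the statement is the Claim_ definition above) =====
theorem build_tng_stats_tablestring_spec : Claim_equal_build_tng_stats_tablestring := by
  intro el ts ds tes _
  unfold Spec_build_tng_stats_tablestring build_tng_stats_tablestring build_tng_stats_tablestring_alt
  rw [join_eq_foldl]
  simp only [merged_getD]
  rw [List.foldl_append, foldl_map_row]
  simp only [List.foldl_cons, List.foldl_nil, pvRowB, if_contains_getD]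
  apply String.toList_injective
  simp [String.toList_append]
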